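-- pv_equiv track=rewrite | github.com/myeongseok-gwon/paper-review-podcast-agent | daily_papers/zotero_bib.py | _iter_entry_blocks
-- ===== SOURCE A (Python) =====
-- from typing import Dict, List, Optional
--
-- def _iter_entry_blocks(text: str) -> List[str]:
--     blocks: List[str] = []
--     i = 0
--     n = len(text)
--     while i < n:
--         at = text.find("@", i)
--         if at < 0:
--             break
--         brace = text.find("{", at)
--         if brace < 0:
--             break
--         depth = 0
--         j = brace
--         while j < n:
--             ch = text[j]
--             if ch == "{":
--                 depth += 1
--             elif ch == "}":
--                 depth -= 1
--                 if depth == 0: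
--                     blocks.append(text[at : j + 1])
--                     i = j + 1
--                     break
--             j += 1
--         else:
--             break
--     return blocks
-- ===== SOURCE B (Python) =====
-- def _iter_entry_blocks(text):
--     blocks = []
--     mode = 0  # 0 = SEEK_AT, 1 = SEEK_BRACE, 2 = IN_BLOCK
--     start = 0
--     depth = 0
--     for j, ch in enumerate(text):
--         if mode == 0:
--             if ch == "@":
--                 mode = 1
--                 start = j
--         elif mode == 1:
--             if ch == "{":
--                 mode = 2
--                 depth = 1
--         else:
--             if ch == "{":
--                 depth += 1
--             elif ch == "}":
--                 depth -= 1
--                 if depth == 0: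
--                     blocks.append(text[start : j + 1])
--                     mode = 0
--     return blocks
-- ===== Notes on version B (the rewrite author's own statement) =====
-- stated objective: alternative
-- what changed: Replaces A's outer while-loop with two str.find scans plus a nested brace-counting loop by a single flat pass over enumerate(text) driven by a three-state machine (SEEK_AT / SEEK_BRACE / IN_BLOCK) with a remembered start index.
import Mathlib
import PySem

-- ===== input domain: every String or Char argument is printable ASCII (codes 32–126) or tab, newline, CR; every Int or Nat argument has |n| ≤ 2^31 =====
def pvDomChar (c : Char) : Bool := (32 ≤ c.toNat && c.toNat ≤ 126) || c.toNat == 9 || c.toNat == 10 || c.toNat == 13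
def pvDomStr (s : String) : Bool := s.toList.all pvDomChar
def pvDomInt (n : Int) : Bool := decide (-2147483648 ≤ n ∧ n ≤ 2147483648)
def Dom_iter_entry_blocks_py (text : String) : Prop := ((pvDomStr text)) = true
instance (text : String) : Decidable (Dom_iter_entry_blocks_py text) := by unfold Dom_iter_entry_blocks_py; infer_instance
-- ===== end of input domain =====

-- B replaces A's nested find/brace-scan loops by one flat state machine over the characters (same cost, different decomposition).

-- Python slice text[a:b]; exact for the in-range 0 ≤ a ≤ b ≤ len indices both ports use it with.
def mkSlice (cs : List Char) (a b : Nat) : String := String.mk ((cs.drop a).take (b - a))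

-- ===== PORT A =====
-- text.find(c, i) for a single character c, as a scan of the suffix text[i:]: first index ≥ i holding c, none = Python's -1 (exact).
def findChGo (c : Char) : List Char → Nat → Option Nat
  | [], _ => none
  | x :: xs, i => if x = c then some i else findChGo c xs (i + 1)

def findCh (cs : List Char) (c : Char) (i : Nat) : Option Nat := findChGo c (cs.drop i) i

-- A's inner `while j < n` brace loop over the suffix text[j:]: the index where depth hits 0, none if the loop runs off the end.
def innerGo : List Char → Nat → Int → Option Nat
  | [], _, _ => none
  | x :: xs, j, depth =>
    if x = '{' then innerGo xs (j + 1) (depth + 1)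
    else if x = '}' then
      if depth - 1 = 0 then some j else innerGo xs (j + 1) (depth - 1)
    else innerGo xs (j + 1) depth

def innerA (cs : List Char) (j : Nat) (depth : Int) : Option Nat := innerGo (cs.drop j) j depth

-- A's outer `while i < n` loop; the fuel `rem` only makes it total (each iteration advances i, so rem ≥ n - i is enough; exact).
def outerA (cs : List Char) : Nat → Nat → List String → List String
  | 0, _, blocks => blocks
  | rem + 1, i, blocks =>
    if i < cs.length then
      match findCh cs '@' i with
      | none => blocks
      | some a =>
        match findCh cs '{' a with
        | none => blocks
        | some brace =>
          match innerA cs brace 0 with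
          | none => blocks
          | some j => outerA cs rem (j + 1) (blocks ++ [mkSlice cs a (j + 1)])
    else blocks

def iter_entry_blocks_py (text : String) : List String :=
  outerA text.toList text.toList.length 0 []

-- ===== PORT B =====
-- Python's enumerate(text) starting at index i.
def enumFrom (i : Nat) : List Char → List (Nat × Char)
  | [] => []
  | c :: cs => (i, c) :: enumFrom (i + 1) cs

-- B's single for-loop state machine: mode 0 = SEEK_AT, 1 = SEEK_BRACE, 2 = IN_BLOCK.
def loopB (cs : List Char) : List (Nat × Char) → Nat → Nat → Int → List String → List String
  | [], _, _, _, blocks => blocks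
  | (j, ch) :: rest, mode, start, depth, blocks =>
    if mode = 0 then
      if ch = '@' then loopB cs rest 1 j depth blocks
      else loopB cs rest 0 start depth blocks
    else if mode = 1 then
      if ch = '{' then loopB cs rest 2 start 1 blocks
      else loopB cs rest 1 start depth blocks
    else
      if ch = '{' then loopB cs rest 2 start (depth + 1) blocks
      else if ch = '}' then
        if depth - 1 = 0 then loopB cs rest 0 start 0 (blocks ++ [mkSlice cs start (j + 1)])
        else loopB cs rest 2 start (depth - 1) blocks
      else loopB cs rest 2 start depth blocks

def iter_entry_blocks_py_alt (text : String) : List String :=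
  loopB text.toList (enumFrom 0 text.toList) 0 0 0 []

-- ===== PRECONDITION & SPEC =====
def Spec_iter_entry_blocks_py (text : String) (out : List String) : Prop := out = iter_entry_blocks_py_alt text
instance (text : String) (out : List String) : Decidable (Spec_iter_entry_blocks_py text out) := by unfold Spec_iter_entry_blocks_py; infer_instance

-- ===== CLAIM (what is proved, stated in full; the proofs are below) =====
def Claim_equal_iter_entry_blocks_py : Prop := ∀ (text : String), Dom_iter_entry_blocks_py text → Spec_iter_entry_blocks_py text (iter_entry_blocks_py text)

-- ===== LEMMAS AND PROOFS =====

-- equation lemmas for findCh / innerA in terms of absolute indices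
theorem findCh_ge_len (cs : List Char) (c : Char) (i : Nat) (h : cs.length ≤ i) : findCh cs c i = none := by
  unfold findCh; rw [List.drop_eq_nil_of_le h]; rfl

theorem findCh_hit (cs : List Char) (c : Char) (i : Nat) (h : i < cs.length) (hc : cs[i] = c) :
    findCh cs c i = some i := by
  unfold findCh; rw [List.drop_eq_getElem_cons h]; simp [findChGo, hc]

theorem findCh_miss (cs : List Char) (c : Char) (i : Nat) (h : i < cs.length) (hc : cs[i] ≠ c) :
    findCh cs c i = findCh cs c (i + 1) := by
  unfold findCh; rw [List.drop_eq_getElem_cons h]; simp [findChGo, hc]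

theorem innerA_ge_len (cs : List Char) (j : Nat) (d : Int) (h : cs.length ≤ j) : innerA cs j d = none := by
  unfold innerA; rw [List.drop_eq_nil_of_le h]; rfl

theorem innerA_open (cs : List Char) (j : Nat) (d : Int) (h : j < cs.length) (hc : cs[j] = '{') :
    innerA cs j d = innerA cs (j + 1) (d + 1) := by
  unfold innerA; rw [List.drop_eq_getElem_cons h]; simp [innerGo, hc]

theorem innerA_close_hit (cs : List Char) (j : Nat) (d : Int) (h : j < cs.length)
    (hc : cs[j] = '}') (hd : d - 1 = 0) : innerA cs j d = some j := by
  unfold innerA; rw [List.drop_eq_getElem_cons h]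
  have h1 : cs[j] ≠ '{' := by rw [hc]; decide
  simp [innerGo, h1, hc, hd]

theorem innerA_close_miss (cs : List Char) (j : Nat) (d : Int) (h : j < cs.length)
    (hc : cs[j] = '}') (hd : ¬ d - 1 = 0) : innerA cs j d = innerA cs (j + 1) (d - 1) := by
  unfold innerA; rw [List.drop_eq_getElem_cons h]
  have h1 : cs[j] ≠ '{' := by rw [hc]; decide
  simp [innerGo, h1, hc, hd]

theorem innerA_other (cs : List Char) (j : Nat) (d : Int) (h : j < cs.length)
    (h1 : cs[j] ≠ '{') (h2 : cs[j] ≠ '}') : innerA cs j d = innerA cs (j + 1) d := by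
  unfold innerA; rw [List.drop_eq_getElem_cons h]; simp [innerGo, h1, h2]

-- result indices never precede the scan start
theorem findChGo_le (c : Char) : ∀ (l : List Char) (i a : Nat), findChGo c l i = some a → i ≤ a := by
  intro l
  induction l with
  | nil => intro i a h; simp [findChGo] at h
  | cons x xs ih =>
    intro i a h
    by_cases hx : x = c
    · simp [findChGo, hx] at h; omega
    · simp [findChGo, hx] at h
      have := ih (i + 1) a h; omega

theorem findCh_le (cs : List Char) (c : Char) (i a : Nat) (h : findCh cs c i = some a) : i ≤ a :=
  findChGo_le c (cs.drop i) i a h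

theorem innerGo_le : ∀ (l : List Char) (j : Nat) (d : Int) (a : Nat), innerGo l j d = some a → j ≤ a := by
  intro l
  induction l with
  | nil => intro j d a h; simp [innerGo] at h
  | cons x xs ih =>
    intro j d a h
    by_cases hob : x = '{'
    · simp [innerGo, hob] at h
      have := ih (j + 1) (d + 1) a h; omega
    · by_cases hcb : x = '}'
      · by_cases hd : d - 1 = 0
        · simp [innerGo, hob, hcb, hd] at h; omega
        · simp [innerGo, hob, hcb, hd] at h
          have := ih (j + 1) (d - 1) a h; omega
      · simp [innerGo, hob, hcb] at h
        have := ih (j + 1) d a h; omega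

theorem innerA_le (cs : List Char) (j : Nat) (d : Int) (a : Nat) (h : innerA cs j d = some a) : j ≤ a :=
  innerGo_le (cs.drop j) j d a h

theorem findCh_some (cs : List Char) (c : Char) :
    ∀ (K i a : Nat), cs.length - i ≤ K → findCh cs c i = some a →
      ∃ (hlt : a < cs.length), cs[a] = c := by
  intro K
  induction K with
  | zero =>
    intro i a hK h
    rw [findCh_ge_len cs c i (by omega)] at h; cases h
  | succ K ih =>
    intro i a hK h
    by_cases hi : i < cs.length
    · by_cases hc : cs[i] = c
      · rw [findCh_hit cs c i hi hc] at h; cases h; exact ⟨hi, hc⟩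
      · rw [findCh_miss cs c i hi hc] at h
        exact ih (i + 1) a (by omega) h
    · rw [findCh_ge_len cs c i (by omega)] at h; cases h

-- suffix unfolding of B's enumerated input
theorem enumFrom_drop (cs : List Char) (i : Nat) (h : i < cs.length) :
    enumFrom i (cs.drop i) = (i, cs[i]) :: enumFrom (i + 1) (cs.drop (i + 1)) := by
  rw [List.drop_eq_getElem_cons h]; rfl

theorem enumFrom_drop_nil (cs : List Char) (i : Nat) (h : cs.length ≤ i) :
    enumFrom i (cs.drop i) = [] := by
  rw [List.drop_eq_nil_of_le h]; rfl

-- conditional unfoldings of outerA at successor fuel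
theorem outerA_stop (cs : List Char) (K i : Nat) (blocks : List String) (hi : ¬ i < cs.length) :
    outerA cs (K + 1) i blocks = blocks := by
  simp [outerA, hi]

theorem outerA_c1 (cs : List Char) (K i : Nat) (blocks : List String)
    (hat : findCh cs '@' i = none) : outerA cs (K + 1) i blocks = blocks := by
  by_cases hi : i < cs.length
  · simp [outerA, hi, hat]
  · simp [outerA, hi]

theorem outerA_c2 (cs : List Char) (K i a : Nat) (blocks : List String) (hi : i < cs.length)
    (hat : findCh cs '@' i = some a) (hbr : findCh cs '{' a = none) :
    outerA cs (K + 1) i blocks = blocks := by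
  simp [outerA, hi, hat, hbr]

theorem outerA_c3 (cs : List Char) (K i a brace : Nat) (blocks : List String) (hi : i < cs.length)
    (hat : findCh cs '@' i = some a) (hbr : findCh cs '{' a = some brace)
    (hj : innerA cs brace 0 = none) : outerA cs (K + 1) i blocks = blocks := by
  simp [outerA, hi, hat, hbr, hj]

theorem outerA_c4 (cs : List Char) (K i a brace j : Nat) (blocks : List String) (hi : i < cs.length)
    (hat : findCh cs '@' i = some a) (hbr : findCh cs '{' a = some brace)
    (hj : innerA cs brace 0 = some j) :
    outerA cs (K + 1) i blocks = outerA cs K (j + 1) (blocks ++ [mkSlice cs a (j + 1)]) := by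
  simp [outerA, hi, hat, hbr, hj]

-- the fuel does not matter once it covers the remaining length
theorem outerA_fuel (cs : List Char) :
    ∀ (K K' i : Nat) (blocks : List String), cs.length - i ≤ K → cs.length - i ≤ K' →
      outerA cs K i blocks = outerA cs K' i blocks := by
  intro K
  induction K with
  | zero =>
    intro K' i blocks hK hK'
    cases K' with
    | zero => rfl
    | succ K' => rw [outerA_stop cs K' i blocks (by omega)]; rfl
  | succ K ih =>
    intro K' i blocks hK hK'
    cases K' with
    | zero => rw [outerA_stop cs K i blocks (by omega)]; rfl
    | succ K' =>
      by_cases hi : i < cs.length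
      · cases hat : findCh cs '@' i with
        | none => rw [outerA_c1 cs K i blocks hat, outerA_c1 cs K' i blocks hat]
        | some a =>
          cases hbr : findCh cs '{' a with
          | none => rw [outerA_c2 cs K i a blocks hi hat hbr, outerA_c2 cs K' i a blocks hi hat hbr]
          | some brace =>
            cases hj : innerA cs brace 0 with
            | none => rw [outerA_c3 cs K i a brace blocks hi hat hbr hj,
                outerA_c3 cs K' i a brace blocks hi hat hbr hj]
            | some j =>
              have h1 := findCh_le cs '@' i a hat
              have h2 := findCh_le cs '{' a brace hbr
              have h3 := innerA_le cs brace 0 j hj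
              rw [outerA_c4 cs K i a brace j blocks hi hat hbr hj,
                outerA_c4 cs K' i a brace j blocks hi hat hbr hj]
              exact ih K' (j + 1) _ (by omega) (by omega)
      · rw [outerA_stop cs K i blocks hi, outerA_stop cs K' i blocks hi]

-- mode 1 (SEEK_BRACE) scans exactly like A's find("{", ·)
theorem state1 (cs : List Char) (a : Nat) :
    ∀ (K m : Nat) (d : Int) (blocks : List String), cs.length - m ≤ K →
      loopB cs (enumFrom m (cs.drop m)) 1 a d blocks =
        match findCh cs '{' m with
        | none => blocks
        | some brace => loopB cs (enumFrom (brace + 1) (cs.drop (brace + 1))) 2 a 1 blocks := by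
  intro K
  induction K with
  | zero =>
    intro m d blocks hK
    rw [enumFrom_drop_nil cs m (by omega), findCh_ge_len cs '{' m (by omega)]; rfl
  | succ K ih =>
    intro m d blocks hK
    by_cases hm : m < cs.length
    · rw [enumFrom_drop cs m hm]
      by_cases hc : cs[m] = '{'
      · rw [findCh_hit cs '{' m hm hc]
        simp [loopB, hc]
      · have step : loopB cs ((m, cs[m]) :: enumFrom (m + 1) (cs.drop (m + 1))) 1 a d blocks
            = loopB cs (enumFrom (m + 1) (cs.drop (m + 1))) 1 a d blocks := by
          simp [loopB, hc]
        rw [step, ih (m + 1) d blocks (by omega), findCh_miss cs '{' m hm hc]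
    · rw [enumFrom_drop_nil cs m (by omega), findCh_ge_len cs '{' m (by omega)]; rfl

-- mode 2 (IN_BLOCK) scans exactly like A's inner brace loop
theorem state2 (cs : List Char) (a : Nat) :
    ∀ (K m : Nat) (depth : Int) (blocks : List String), cs.length - m ≤ K →
      loopB cs (enumFrom m (cs.drop m)) 2 a depth blocks =
        match innerA cs m depth with
        | none => blocks
        | some j =>
            loopB cs (enumFrom (j + 1) (cs.drop (j + 1))) 0 a 0 (blocks ++ [mkSlice cs a (j + 1)]) := by
  intro K
  induction K with
  | zero =>
    intro m depth blocks hK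
    rw [enumFrom_drop_nil cs m (by omega), innerA_ge_len cs m depth (by omega)]; rfl
  | succ K ih =>
    intro m depth blocks hK
    by_cases hm : m < cs.length
    · rw [enumFrom_drop cs m hm]
      by_cases hob : cs[m] = '{'
      · have step : loopB cs ((m, cs[m]) :: enumFrom (m + 1) (cs.drop (m + 1))) 2 a depth blocks
            = loopB cs (enumFrom (m + 1) (cs.drop (m + 1))) 2 a (depth + 1) blocks := by
          simp [loopB, hob]
        rw [step, ih (m + 1) (depth + 1) blocks (by omega), innerA_open cs m depth hm hob]
      · by_cases hcb : cs[m] = '}'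
        · by_cases hd : depth - 1 = 0
          · rw [innerA_close_hit cs m depth hm hcb hd]
            simp [loopB, hob, hcb, hd]
          · have step : loopB cs ((m, cs[m]) :: enumFrom (m + 1) (cs.drop (m + 1))) 2 a depth blocks
                = loopB cs (enumFrom (m + 1) (cs.drop (m + 1))) 2 a (depth - 1) blocks := by
              simp [loopB, hob, hcb, hd]
            rw [step, ih (m + 1) (depth - 1) blocks (by omega), innerA_close_miss cs m depth hm hcb hd]
        · have step : loopB cs ((m, cs[m]) :: enumFrom (m + 1) (cs.drop (m + 1))) 2 a depth blocks
              = loopB cs (enumFrom (m + 1) (cs.drop (m + 1))) 2 a depth blocks := by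
            simp [loopB, hob, hcb]
          rw [step, ih (m + 1) depth blocks (by omega), innerA_other cs m depth hm hob hcb]
    · rw [enumFrom_drop_nil cs m (by omega), innerA_ge_len cs m depth (by omega)]; rfl

-- mode 0 (SEEK_AT) from position i agrees with A's outer loop at i (with fuel K covering the rest)
theorem state0 (cs : List Char) :
    ∀ (K i s : Nat) (d : Int) (blocks : List String), cs.length - i ≤ K →
      loopB cs (enumFrom i (cs.drop i)) 0 s d blocks = outerA cs K i blocks := by
  intro K
  induction K with
  | zero =>
    intro i s d blocks hK
    rw [enumFrom_drop_nil cs i (by omega)]; rfl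
  | succ K ih =>
    intro i s d blocks hK
    by_cases hi : i < cs.length
    · rw [enumFrom_drop cs i hi]
      by_cases ha : cs[i] = '@'
      · have step : loopB cs ((i, cs[i]) :: enumFrom (i + 1) (cs.drop (i + 1))) 0 s d blocks
            = loopB cs (enumFrom (i + 1) (cs.drop (i + 1))) 1 i d blocks := by
          simp [loopB, ha]
        rw [step]
        have hat : findCh cs '@' i = some i := findCh_hit cs '@' i hi ha
        have hATbr : findCh cs '{' i = findCh cs '{' (i + 1) :=
          findCh_miss cs '{' i hi (by rw [ha]; decide)
        have hs1 := state1 cs i (cs.length - (i + 1)) (i + 1) d blocks (by omega)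
        cases hbr : findCh cs '{' (i + 1) with
        | none =>
          rw [hbr] at hs1
          rw [outerA_c2 cs K i i blocks hi hat (by rw [hATbr, hbr])]
          exact hs1
        | some brace =>
          rw [hbr] at hs1
          obtain ⟨hblt, hbc⟩ := findCh_some cs '{' cs.length (i + 1) brace (by omega) hbr
          have hble := findCh_le cs '{' (i + 1) brace hbr
          have hin : innerA cs brace 0 = innerA cs (brace + 1) 1 := by
            rw [innerA_open cs brace 0 hblt hbc]; norm_num
          have hs2 := state2 cs i (cs.length - (brace + 1)) (brace + 1) 1 blocks (by omega)
          cases hj : innerA cs (brace + 1) 1 with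
          | none =>
            rw [hj] at hs2
            rw [outerA_c3 cs K i i brace blocks hi hat (by rw [hATbr, hbr]) (by rw [hin, hj])]
            exact hs1.trans hs2
          | some j =>
            rw [hj] at hs2
            have hjle := innerA_le cs (brace + 1) 1 j hj
            have hih := ih (j + 1) i 0 (blocks ++ [mkSlice cs i (j + 1)]) (by omega)
            rw [outerA_c4 cs K i i brace j blocks hi hat (by rw [hATbr, hbr]) (by rw [hin, hj]),
              ← hih]
            exact hs1.trans hs2
      · have step : loopB cs ((i, cs[i]) :: enumFrom (i + 1) (cs.drop (i + 1))) 0 s d blocks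
            = loopB cs (enumFrom (i + 1) (cs.drop (i + 1))) 0 s d blocks := by
          simp [loopB, ha]
        rw [step, ih (i + 1) s d blocks (by omega),
          outerA_fuel cs K (K + 1) (i + 1) blocks (by omega) (by omega)]
        by_cases hi1 : i + 1 < cs.length
        · cases hat : findCh cs '@' (i + 1) with
          | none =>
            rw [outerA_c1 cs K (i + 1) blocks hat,
              outerA_c1 cs K i blocks (by rw [findCh_miss cs '@' i hi ha, hat])]
          | some a =>
            have hat' : findCh cs '@' i = some a := by rw [findCh_miss cs '@' i hi ha, hat]
            cases hbr : findCh cs '{' a with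
            | none => rw [outerA_c2 cs K (i + 1) a blocks hi1 hat hbr,
                outerA_c2 cs K i a blocks hi hat' hbr]
            | some brace =>
              cases hj : innerA cs brace 0 with
              | none => rw [outerA_c3 cs K (i + 1) a brace blocks hi1 hat hbr hj,
                  outerA_c3 cs K i a brace blocks hi hat' hbr hj]
              | some j =>
                rw [outerA_c4 cs K (i + 1) a brace j blocks hi1 hat hbr hj,
                  outerA_c4 cs K i a brace j blocks hi hat' hbr hj]
        · have hnone : findCh cs '@' (i + 1) = none := findCh_ge_len cs '@' (i + 1) (by omega)
          rw [outerA_stop cs K (i + 1) blocks hi1,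
            outerA_c1 cs K i blocks (by rw [findCh_miss cs '@' i hi ha, hnone])]
    · rw [enumFrom_drop_nil cs i (by omega), outerA_stop cs K i blocks hi]; rfl

-- ===== VERDICT (by name: the statement is the Claim_ definition above) =====
theorem iter_entry_blocks_py_spec : Claim_equal_iter_entry_blocks_py := by
  intro text _
  unfold Spec_iter_entry_blocks_py iter_entry_blocks_py iter_entry_blocks_py_alt
  have h := state0 text.toList text.toList.length 0 0 0 [] (by omega)
  rw [List.drop_zero] at h
  exact h.symm
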